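-- pv_equiv track=rewrite | github.com/FerchaS2/TIC-2025 | TP 6/ej6.py | construir_determinante
-- ===== SOURCE A (Python) =====
-- def construir_determinante(m, c1, c2):
--     """
--     Construye D de forma (m x (m-1)) que agrupa columnas c1 y c2 en UNA nueva columna.
--     Retorna D como lista de filas.
--     """
--     m_new = m - 1
--     # mapping[j] = índice de la columna nueva donde va la columna original j
--     mapping = [None] * m
--
--     new_idx = 0
--     combined_idx = None  # índice asignado a la columna combinada (cuando aparezca la 1ra)
--     for j in range(m):
--         if j == c1 or j == c2:
--             if combined_idx is None:
--                 # primera de las dos columnas combinadas -> le asignamos una nueva columna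
--                 combined_idx = new_idx
--                 mapping[j] = combined_idx
--                 new_idx += 1
--             else:
--                 # segunda de las columnas combinadas -> usa el mismo índice que la primera
--                 mapping[j] = combined_idx
--         else:
--             # columna no combinada -> le asignamos la siguiente columna nueva
--             mapping[j] = new_idx
--             new_idx += 1
--
--     # Ahora construimos D (m filas x m_new columnas) según el mapping
--     D = [[0 for _ in range(m_new)] for _ in range(m)]
--     for j in range(m):
--         D[j][mapping[j]] = 1
--
--     return D
-- ===== SOURCE B (Python) =====
-- def construir_determinante(m, c1, c2):
--     """
--     Construye D de forma (m x (m-1)) que agrupa columnas c1 y c2 en UNA nueva columna.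
--     Retorna D como lista de filas.
--     """
--     n = m - 1
--     # empezamos con la identidad de (m-1) x (m-1)
--     D = [[int(i == k) for k in range(n)] for i in range(n)]
--     if 0 <= c1 < m and 0 <= c2 < m and c1 != c2:
--         a, b = sorted((c1, c2))
--         # duplicamos la fila del indice combinado: insertamos una copia de e_a en la posicion b
--         D.insert(b, list(D[a]))
--     return D
-- ===== Notes on version B (the rewrite author's own statement) =====
-- stated objective: simpler
-- what changed: B abandons A's column-mapping construction entirely (the new_idx/combined_idx accumulator loop building mapping[], a zero-matrix allocation and a per-row fill loop): it builds the (m-1)x(m-1) identity matrix and obtains the result by a single list insertion that duplicates row min(c1,c2) at position max(c1,c2).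
import Mathlib
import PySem

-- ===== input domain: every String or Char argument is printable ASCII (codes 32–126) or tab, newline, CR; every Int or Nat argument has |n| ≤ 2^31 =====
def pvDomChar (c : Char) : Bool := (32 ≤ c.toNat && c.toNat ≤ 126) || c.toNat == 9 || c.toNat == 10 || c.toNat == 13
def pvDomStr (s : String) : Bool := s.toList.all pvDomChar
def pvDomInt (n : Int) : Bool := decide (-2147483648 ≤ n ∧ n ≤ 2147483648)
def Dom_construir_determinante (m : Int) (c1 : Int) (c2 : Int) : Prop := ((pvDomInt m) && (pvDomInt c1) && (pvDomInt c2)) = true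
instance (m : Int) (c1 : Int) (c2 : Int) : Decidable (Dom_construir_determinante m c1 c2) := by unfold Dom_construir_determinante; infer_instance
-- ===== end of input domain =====

-- B drops A's column-mapping pass and fill loop entirely: it builds the (m-1)x(m-1)
-- identity matrix and duplicates one of its rows by a single list insertion (objective: simpler).

-- ===== PORT A =====
-- loop body of A's mapping loop: state = (mapping, new_idx, combined_idx)
def pvStepA (c1 c2 : Int) (st : List (Option Int) × Int × Option Int) (j : Int) :
    List (Option Int) × Int × Option Int :=
  if j = c1 ∨ j = c2 then
    match st.2.2 with
    | none => (PySem.List.pySetD st.1 j (some st.2.1), st.2.1 + 1, some st.2.1)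
    | some ci => (PySem.List.pySetD st.1 j (some ci), st.2.1, some ci)
  else (PySem.List.pySetD st.1 j (some st.2.1), st.2.1 + 1, st.2.2)

def construir_determinante (m : Int) (c1 : Int) (c2 : Int) : List (List Int) :=
  let m_new := m - 1
  let mapping0 : List (Option Int) := List.replicate m.toNat none   -- [None] * m
  let st := (PySem.List.pyRange 0 m 1).foldl (pvStepA c1 c2) (mapping0, 0, none)
  let mapping := st.1
  let D0 := (PySem.List.pyRange 0 m 1).map
    (fun _ => (PySem.List.pyRange 0 m_new 1).map (fun _ => (0 : Int)))
  -- D[j][mapping[j]] = 1 ; under Pre_ every index is in range and mapping[j] a 'some',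
  -- so the '.getD' defaults of these total primitives are never reached
  (PySem.List.pyRange 0 m 1).foldl
    (fun D j => PySem.List.pySetD D j
      (PySem.List.pySetD (PySem.List.pyGetD D j [])
        ((PySem.List.pyGetD mapping j none).getD 0) 1)) D0

-- ===== PORT B =====
def construir_determinante_alt (m : Int) (c1 : Int) (c2 : Int) : List (List Int) :=
  let n := m - 1
  -- identity matrix of size (m-1) x (m-1)
  let D := (PySem.List.pyRange 0 n 1).map (fun i =>
    (PySem.List.pyRange 0 n 1).map (fun k => if i = k then 1 else 0))
  if 0 ≤ c1 ∧ c1 < m ∧ 0 ≤ c2 ∧ c2 < m ∧ c1 ≠ c2 then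
    -- a, b = sorted((c1, c2)); D.insert(b, list(D[a]))
    -- D[a] ported as pyGetD: in this branch 0 ≤ a < n always holds, so the default is never reached
    PySem.List.insert D (max c1 c2) (PySem.List.pyGetD D (min c1 c2) [])
  else D

-- ===== PRECONDITION & SPEC =====
-- Pre_ excludes exactly the inputs where A raises IndexError: m ≥ 1 with c1, c2 not two
-- distinct in-range column indices (then A's mapping sends column m-1 to index m-1,
-- which does not exist in a width-(m-1) row).
def Pre_construir_determinante (m : Int) (c1 : Int) (c2 : Int) : Prop :=
  m ≤ 0 ∨ (0 ≤ c1 ∧ c1 < m ∧ 0 ≤ c2 ∧ c2 < m ∧ c1 ≠ c2)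
instance (m : Int) (c1 : Int) (c2 : Int) : Decidable (Pre_construir_determinante m c1 c2) := by
  unfold Pre_construir_determinante; infer_instance

def pvWitness_construir_determinante : Int × Int × Int := (3, 0, 2)

def Spec_construir_determinante (m : Int) (c1 : Int) (c2 : Int) (out : List (List Int)) : Prop := out = construir_determinante_alt m c1 c2
instance (m : Int) (c1 : Int) (c2 : Int) (out : List (List Int)) : Decidable (Spec_construir_determinante m c1 c2 out) := by unfold Spec_construir_determinante; infer_instance

-- ===== CLAIM (what is proved, stated in full; the proofs are below) =====
def Claim_equal_construir_determinante : Prop := ∀ (m : Int) (c1 : Int) (c2 : Int), Dom_construir_determinante m c1 c2 → Pre_construir_determinante m c1 c2 → Spec_construir_determinante m c1 c2 (construir_determinante m c1 c2)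

-- ===== LEMMAS AND PROOFS =====

-- the common description both ports are reduced to: row j carries a 1 at column pvCol a b j
def pvCol (a b : Int) (j : Int) : Int := if j < b then j else if j = b then a else j - 1

def pvMatrix (a b m : Int) : List (List Int) :=
  (PySem.List.pyRange 0 m 1).map (fun j =>
    (PySem.List.pyRange 0 (m - 1) 1).map (fun k => if k = pvCol a b j then 1 else 0))

def pvStA (a b m : Int) (t : Nat) : List (Option Int) × Int × Option Int :=
  ((PySem.List.pyRange 0 (t : Int) 1).map (fun i => some (pvCol a b i)) ++
     List.replicate (m.toNat - t) none,
   (if b < (t : Int) then (t : Int) - 1 else (t : Int)),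
   (if a < (t : Int) then some a else none))

theorem pvMapA (c1 c2 a b m : Int)
    (hor : ∀ j, (j = c1 ∨ j = c2) ↔ (j = a ∨ j = b))
    (ha : 0 ≤ a) (hab : a < b) (hbm : b < m) :
    ∀ t : Nat, (t : Int) ≤ m →
      (PySem.List.pyRange 0 (t : Int) 1).foldl (pvStepA c1 c2)
        (List.replicate m.toNat none, 0, none) = pvStA a b m t := by
  intro t
  induction t with
  | zero =>
    intro _
    have h1 : ¬ b < (0:Int) := by omega
    have h2 : ¬ a < (0:Int) := by omega
    simp [pvStA, PySem.List.pyRange_one_eq_nil (le_refl _), h1, h2]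
  | succ t ih =>
    intro ht1
    have ht : (t : Int) ≤ m := by push_cast at ht1 ⊢; omega
    have hsplit : PySem.List.pyRange 0 ((t+1 : Nat) : Int) 1
        = PySem.List.pyRange 0 (t : Int) 1 ++ [(t : Int)] := by
      push_cast
      exact PySem.List.pyRange_one_succ_right (by omega)
    rw [hsplit, List.foldl_append, ih ht]
    -- prefix bookkeeping
    have hlenpre : ((PySem.List.pyRange 0 (t : Int) 1).map (fun i => some (pvCol a b i))).length = t := by
      simp [PySem.List.length_pyRange_one]
    have htm : t < m.toNat := by omega
    have hrep : List.replicate (m.toNat - t) (none : Option Int)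
        = none :: List.replicate (m.toNat - (t+1)) none := by
      have : m.toNat - t = (m.toNat - (t+1)) + 1 := by omega
      rw [this, List.replicate_succ]
    have hpre1 : (PySem.List.pyRange 0 ((t+1:Nat) : Int) 1).map (fun i => some (pvCol a b i))
        = (PySem.List.pyRange 0 (t : Int) 1).map (fun i => some (pvCol a b i)) ++ [some (pvCol a b t)] := by
      push_cast
      rw [PySem.List.pyRange_one_succ_right (by omega : (0:Int) ≤ t), List.map_append]
      simp
    push_cast at hpre1
    have hset : ∀ v : Option Int,
        PySem.List.pySetD (pvStA a b m t).1 (t : Int) v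
        = (PySem.List.pyRange 0 (t : Int) 1).map (fun i => some (pvCol a b i)) ++ v :: List.replicate (m.toNat - (t+1)) none := by
      intro v
      rw [PySem.List.pySetD_natCast]
      unfold pvStA
      rw [hrep]
      conv_lhs => rw [show t = ((PySem.List.pyRange 0 (t : Int) 1).map (fun i => some (pvCol a b i))).length from hlenpre.symm]
      simp
    -- case analysis on where t sits relative to a and b
    simp only [List.foldl_cons, List.foldl_nil, pvStepA]
    rcases lt_trichotomy (t : Int) a with hta | hta | hta
    · -- t < a : not a merge column
      rw [if_neg (by rw [hor]; omega)]
      have e1 : ¬ b < (t:Int) := by omega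
      have e2 : ¬ b < (t:Int)+1 := by omega
      have e3 : ¬ a < (t:Int) := by omega
      have e4 : ¬ a < (t:Int)+1 := by omega
      have ecol : pvCol a b (t:Int) = (t:Int) := by unfold pvCol; rw [if_pos (by omega)]
      unfold pvStA
      push_cast
      rw [hrep]
      simp [e1, e2, e3, e4, ecol, hpre1, List.append_assoc]
    · -- t = a : first merge column
      rw [if_pos (by rw [hor]; omega)]
      subst hta
      have e1 : ¬ b < (t:Int) := by omega
      have e2 : ¬ b < (t:Int)+1 := by omega
      have e3 : ¬ (t:Int) < (t:Int) := by omega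
      have e4 : (t:Int) < (t:Int)+1 := by omega
      have ecol : pvCol (t:Int) b (t:Int) = (t:Int) := by unfold pvCol; rw [if_pos (by omega)]
      unfold pvStA
      push_cast
      rw [hrep]
      simp [e1, e2, e4, ecol, hpre1, List.append_assoc]
    · rcases lt_trichotomy (t : Int) b with htb | htb | htb
      · -- a < t < b : not a merge column
        rw [if_neg (by rw [hor]; omega)]
        have e1 : ¬ b < (t:Int) := by omega
        have e2 : ¬ b < (t:Int)+1 := by omega
        have e3 : a < (t:Int) := by omega
        have e4 : a < (t:Int)+1 := by omega
        have ecol : pvCol a b (t:Int) = (t:Int) := by unfold pvCol; rw [if_pos (by omega)]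
        unfold pvStA
        push_cast
        rw [hrep]
        simp [e1, e2, e3, e4, ecol, hpre1, List.append_assoc]
      · -- t = b : second merge column, reuses combined index a
        rw [if_pos (by rw [hor]; omega)]
        subst htb
        have e1 : ¬ (t:Int) < (t:Int) := by omega
        have e2 : (t:Int) < (t:Int)+1 := by omega
        have e3 : a < (t:Int) := by omega
        have e4 : a < (t:Int)+1 := by omega
        have ecol : pvCol a (t:Int) (t:Int) = a := by unfold pvCol; rw [if_neg (by omega), if_pos rfl]
        unfold pvStA
        push_cast
        rw [hrep]
        simp [e2, e3, e4, ecol, hpre1, List.append_assoc]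
      · -- b < t : not a merge column
        rw [if_neg (by rw [hor]; omega)]
        have e1 : b < (t:Int) := by omega
        have e2 : b < (t:Int)+1 := by omega
        have e3 : a < (t:Int) := by omega
        have e4 : a < (t:Int)+1 := by omega
        have ecol : pvCol a b (t:Int) = (t:Int) - 1 := by unfold pvCol; rw [if_neg (by omega), if_neg (by omega)]
        unfold pvStA
        push_cast
        rw [hrep]
        simp [e1, e2, e3, e4, ecol, hpre1, List.append_assoc]

-- setting one in-range cell of the zero row gives the indicator row
theorem pvRow (w c : Int) (hc : 0 ≤ c) :
    PySem.List.pySetD ((PySem.List.pyRange 0 w 1).map (fun _ => (0 : Int))) c 1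
      = (PySem.List.pyRange 0 w 1).map (fun k => if k = c then 1 else 0) := by
  rw [PySem.List.pySetD_of_nonneg _ _ hc]
  apply List.ext_getElem
  · simp
  · intro n h1 h2
    simp only [List.getElem_set, List.getElem_map, PySem.List.getElem_pyRange_one]
    simp only [List.length_set, List.length_map, PySem.List.length_pyRange_one] at h1
    split_ifs with h h' h'
    · rfl
    · exact absurd (by omega : (0 : Int) + n = c) h'
    · exact absurd (by omega : c.toNat = n) h
    · rfl

-- A's fill loop writes row j at step j only: over replicated rows it is a map
theorem pvFill (f : Int → List Int → List Int) (zrow : List Int) :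
    ∀ (k : Nat) (pre : List (List Int)),
      (PySem.List.pyRange (pre.length : Int) ((pre.length : Int) + k) 1).foldl
        (fun D j => PySem.List.pySetD D j (f j (PySem.List.pyGetD D j [])))
        (pre ++ List.replicate k zrow)
      = pre ++ (PySem.List.pyRange (pre.length : Int) ((pre.length : Int) + k) 1).map
          (fun j => f j zrow) := by
  intro k
  induction k with
  | zero =>
    intro pre
    simp [PySem.List.pyRange_one_eq_nil (le_refl _)]
  | succ k ih =>
    intro pre
    have hcons : PySem.List.pyRange (pre.length : Int) ((pre.length : Int) + (k+1:Nat)) 1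
        = (pre.length : Int) :: PySem.List.pyRange ((pre.length : Int) + 1) ((pre.length : Int) + (k+1:Nat)) 1 :=
      PySem.List.pyRange_one_cons (by push_cast; omega)
    rw [hcons]
    simp only [List.foldl_cons, List.map_cons, List.replicate_succ]
    have hget : PySem.List.pyGetD (pre ++ zrow :: List.replicate k zrow) (pre.length : Int) [] = zrow := by
      rw [PySem.List.pyGetD_natCast]; simp
    rw [hget, PySem.List.pySetD_natCast]
    have hset : (pre ++ zrow :: List.replicate k zrow).set pre.length (f (pre.length : Int) zrow)
        = (pre ++ [f (pre.length : Int) zrow]) ++ List.replicate k zrow := by simp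
    rw [hset]
    have hlen : ((pre ++ [f (pre.length : Int) zrow]).length : Int) = (pre.length : Int) + 1 := by simp
    have := ih (pre ++ [f (pre.length : Int) zrow])
    rw [hlen] at this
    have harg : (pre.length : Int) + 1 + (k : Int) = (pre.length : Int) + ((k+1 : Nat) : Int) := by push_cast; omega
    rw [harg] at this
    rw [this]
    simp

-- A reduces to the indicator matrix in the valid-merge case (a = min, b = max of c1, c2)
theorem pvMain (m c1 c2 a b : Int)
    (ha : 0 ≤ a) (hab : a < b) (hbm : b < m)
    (hor : ∀ j, (j = c1 ∨ j = c2) ↔ (j = a ∨ j = b)) :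
    construir_determinante m c1 c2 = pvMatrix a b m := by
  simp only [construir_determinante, pvMatrix]
  have hmm : ((m.toNat : Nat) : Int) = m := by omega
  have hmap := pvMapA c1 c2 a b m hor ha hab hbm m.toNat (by omega)
  rw [hmm] at hmap
  rw [hmap]
  have hmapping : (pvStA a b m m.toNat).1
      = (PySem.List.pyRange 0 m 1).map (fun i => some (pvCol a b i)) := by
    unfold pvStA
    rw [hmm]
    simp
  simp only [hmapping]
  have hD0 : (PySem.List.pyRange 0 m 1).map
      (fun _ => (PySem.List.pyRange 0 (m-1) 1).map (fun _ => (0 : Int)))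
      = List.replicate m.toNat ((PySem.List.pyRange 0 (m-1) 1).map (fun _ => (0 : Int))) := by
    rw [List.map_const']
    simp [PySem.List.length_pyRange_one]
  rw [hD0]
  have hfill := pvFill
    (fun j r => PySem.List.pySetD r ((PySem.List.pyGetD ((PySem.List.pyRange 0 m 1).map (fun i => some (pvCol a b i))) j none).getD 0) 1)
    ((PySem.List.pyRange 0 (m-1) 1).map (fun _ => (0 : Int))) m.toNat []
  simp only [List.length_nil, Nat.cast_zero, zero_add, List.nil_append, hmm] at hfill
  rw [hfill]
  apply List.map_congr_left
  intro j hj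
  rw [PySem.List.mem_pyRange_one] at hj
  have hcolj1 : 0 ≤ pvCol a b j := by unfold pvCol; split_ifs <;> omega
  rw [PySem.List.pyGetD_map_pyRange_of_nonneg _ _ _ _ hj.1 hj.2]
  simp only [Option.getD_some]
  exact pvRow (m-1) (pvCol a b j) hcolj1

-- an indicator row does not care which side of the '=' the running index is on
theorem pvRowSym (w x : Int) :
    (PySem.List.pyRange 0 w 1).map (fun k => if x = k then (1:Int) else 0)
      = (PySem.List.pyRange 0 w 1).map (fun k => if k = x then 1 else 0) := by
  apply List.map_congr_left
  intro k _
  by_cases h : k = x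
  · simp [h]
  · simp [h, Ne.symm h]

-- B reduces to the same indicator matrix in the valid-merge case
theorem pvAltEq (m c1 c2 : Int)
    (h1 : 0 ≤ c1) (h2 : c1 < m) (h3 : 0 ≤ c2) (h4 : c2 < m) (h5 : c1 ≠ c2) :
    construir_determinante_alt m c1 c2 = pvMatrix (min c1 c2) (max c1 c2) m := by
  simp only [construir_determinante_alt]
  rw [if_pos ⟨h1, h2, h3, h4, h5⟩]
  set a := min c1 c2 with hadef
  set b := max c1 c2 with hbdef
  have ha : 0 ≤ a := le_min h1 h3
  have hab : a < b := by rcases lt_or_gt_of_ne h5 with h | h <;> simp [hadef, hbdef] <;> omega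
  have hbm : b < m := max_lt h2 h4
  have hbn : b.toNat ≤ ((PySem.List.pyRange 0 (m-1) 1).map (fun i =>
      (PySem.List.pyRange 0 (m-1) 1).map (fun k => if i = k then (1:Int) else 0))).length := by
    simp [PySem.List.length_pyRange_one]; omega
  have hgetA : PySem.List.pyGetD ((PySem.List.pyRange 0 (m-1) 1).map (fun i =>
      (PySem.List.pyRange 0 (m-1) 1).map (fun k => if i = k then (1:Int) else 0))) a []
      = (PySem.List.pyRange 0 (m-1) 1).map (fun k => if a = k then (1:Int) else 0) :=
    PySem.List.pyGetD_map_pyRange_of_nonneg _ _ _ _ ha (by omega)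
  rw [hgetA]
  have hbcast : (b.toNat : Int) = b := by omega
  rw [← hbcast, PySem.List.insert_natCast _ _ _ hbn, hbcast]
  apply List.ext_getElem
  · simp [pvMatrix, PySem.List.length_pyRange_one]
    omega
  · intro idx hL hR
    have hRm : idx < m.toNat := by
      simpa [pvMatrix, PySem.List.length_pyRange_one] using hR
    have hlenid : ((PySem.List.pyRange 0 (m-1) 1).map (fun i =>
        (PySem.List.pyRange 0 (m-1) 1).map (fun k => if i = k then (1:Int) else 0))).length
        = (m-1).toNat := by simp [PySem.List.length_pyRange_one]
    have hRmat : (pvMatrix a b m)[idx]'hR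
        = (PySem.List.pyRange 0 (m-1) 1).map (fun k => if k = pvCol a b (idx : Int) then (1:Int) else 0) := by
      simp [pvMatrix, PySem.List.getElem_pyRange_one]
    rw [hRmat]
    rcases lt_trichotomy idx b.toNat with hi | hi | hi
    · -- left of the insertion point: identity row idx
      rw [List.getElem_append_left (by simp [hlenid]; omega)]
      rw [List.getElem_take]
      have hcol : pvCol a b (idx : Int) = (idx : Int) := by
        unfold pvCol; rw [if_pos (by omega)]
      rw [hcol]
      simp only [List.getElem_map, PySem.List.getElem_pyRange_one, zero_add]
      exact pvRowSym (m-1) (idx : Int)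
    · -- the inserted row: a copy of identity row a
      subst hi
      rw [List.getElem_append_right (by simp)]
      have hmin : min b.toNat (m-1).toNat = b.toNat := by omega
      simp only [List.length_take, hlenid, hmin, Nat.sub_self, List.getElem_cons_zero]
      have hcol : pvCol a b ((b.toNat : Nat) : Int) = a := by
        unfold pvCol; rw [if_neg (by omega), if_pos (by omega)]
      rw [hcol]
      exact pvRowSym (m-1) a
    · -- right of the insertion point: identity row idx - 1
      rw [List.getElem_append_right (by simp [hlenid]; omega)]
      have hmin : min b.toNat (m-1).toNat = b.toNat := by omega
      have hidx' : idx - min b.toNat (m - 1).toNat = (idx - b.toNat - 1) + 1 := by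
        rw [hmin]; omega
      simp only [List.length_take, hlenid, hidx', List.getElem_cons_succ, List.getElem_drop,
        List.getElem_map, PySem.List.getElem_pyRange_one, zero_add]
      have hcast : ((b.toNat + (idx - b.toNat - 1) : Nat) : Int) = (idx : Int) - 1 := by
        push_cast; omega
      rw [hcast]
      have hcol : pvCol a b (idx : Int) = (idx : Int) - 1 := by
        unfold pvCol; rw [if_neg (by omega), if_neg (by omega)]
      rw [hcol]
      exact pvRowSym (m-1) ((idx : Int) - 1)

-- ===== VERDICT (by name: the statement is the Claim_ definition above) =====
theorem construir_determinante_spec : Claim_equal_construir_determinante := by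
  intro m c1 c2 _ hpre
  unfold Spec_construir_determinante
  rcases hpre with hm | ⟨h1, h2, h3, h4, h5⟩
  · have hif : ¬ (0 ≤ c1 ∧ c1 < m ∧ 0 ≤ c2 ∧ c2 < m ∧ c1 ≠ c2) := by omega
    simp [construir_determinante, construir_determinante_alt, hif,
      PySem.List.pyRange_one_eq_nil hm, PySem.List.pyRange_one_eq_nil (by omega : m - 1 ≤ 0)]
  · rw [pvAltEq m c1 c2 h1 h2 h3 h4 h5]
    exact pvMain m c1 c2 (min c1 c2) (max c1 c2) (le_min h1 h3)
      (by rcases lt_or_gt_of_ne h5 with h | h <;> simp [min_def, max_def] <;> omega)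
      (max_lt h2 h4) (fun j => by constructor <;> intro h <;> [skip; skip] <;> omega)
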